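-- pv_equiv track=rewrite | github.com/zenithu-s/book_downloader | book_downloader.py | find_best_gutenberg_download
-- ===== SOURCE A (Python) =====
-- from typing import Optional, Dict, List
--
-- def find_best_gutenberg_download(formats: Dict[str,str]):
--     # prefer PDF, then EPUB
--     for key in formats:
--         if "pdf" in key.lower():
--             return ("pdf", formats[key])
--     for key in formats:
--         if "epub" in key.lower():
--             return ("epub", formats[key])
--     return (None, None)
-- ===== SOURCE B (Python) =====
-- def find_best_gutenberg_download(formats):
--     # single scan: return on first pdf; remember first epub value as a fallback
--     epub = None
--     for key, value in formats.items():
--         k = key.lower()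
--         if "pdf" in k:
--             return ("pdf", value)
--         if "epub" in k and epub is None:
--             epub = value
--     return (None, None) if epub is None else ("epub", epub)
-- ===== Notes on version B (the rewrite author's own statement) =====
-- stated objective: simpler
-- what changed: Two sequential scans (pdf scan with a dict re-lookup, then epub scan) are replaced by one scan over items() that returns on the first pdf and keeps the first epub value in a fallback accumulator.
import Mathlib
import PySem

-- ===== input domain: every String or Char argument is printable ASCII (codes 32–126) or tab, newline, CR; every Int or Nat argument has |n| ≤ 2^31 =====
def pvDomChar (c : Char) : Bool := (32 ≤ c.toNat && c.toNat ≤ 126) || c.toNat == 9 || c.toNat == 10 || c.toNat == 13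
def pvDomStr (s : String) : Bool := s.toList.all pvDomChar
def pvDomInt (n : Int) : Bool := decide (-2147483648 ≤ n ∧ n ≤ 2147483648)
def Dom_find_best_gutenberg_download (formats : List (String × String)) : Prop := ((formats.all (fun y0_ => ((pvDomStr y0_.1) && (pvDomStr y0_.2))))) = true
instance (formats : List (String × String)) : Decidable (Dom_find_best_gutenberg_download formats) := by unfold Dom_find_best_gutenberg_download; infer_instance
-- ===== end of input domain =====

-- B replaces A's two scans with one scan carrying a first-epub fallback accumulator; return values proved equal.
-- ===== PORT A =====
-- dict lookup formats[key] (first match; in A the looked-up key is always present)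
def pvLookup : List (String × String) → String → Option String
  | [], _ => none
  | (k, v) :: rest, key => if k == key then some v else pvLookup rest key

-- first loop: 'for key in formats: if "pdf" in key.lower(): return ("pdf", formats[key])'
def pvPdfLoop (formats : List (String × String)) : List (String × String) → Option String
  | [] => none
  | p :: rest =>
    if PySem.Str.isIn "pdf" (PySem.Str.lower p.1) then (pvLookup formats p.1).getD ""
    else pvPdfLoop formats rest

-- second loop: 'for key in formats: if "epub" in key.lower(): return ("epub", formats[key])'
def pvEpubLoop (formats : List (String × String)) : List (String × String) → Option String
  | [] => none
  | p :: rest =>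
    if PySem.Str.isIn "epub" (PySem.Str.lower p.1) then (pvLookup formats p.1).getD ""
    else pvEpubLoop formats rest

def find_best_gutenberg_download (formats : List (String × String)) : Option String × Option String :=
  match pvPdfLoop formats formats with
  | some v => (some "pdf", some v)
  | none =>
    match pvEpubLoop formats formats with
    | some v => (some "epub", some v)
    | none => (none, none)

-- ===== PORT B =====
-- single scan; 'epub' is the fallback accumulator holding the first epub value seen
def pvAltLoop (epub : Option String) : List (String × String) → Option String × Option String
  | [] =>
    match epub with
    | some v => (some "epub", some v)
    | none => (none, none)
  | (k, v) :: rest =>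
    let kl := PySem.Str.lower k
    if PySem.Str.isIn "pdf" kl then (some "pdf", some v)
    else pvAltLoop (if PySem.Str.isIn "epub" kl && epub.isNone then some v else epub) rest

def find_best_gutenberg_download_alt (formats : List (String × String)) : Option String × Option String :=
  pvAltLoop none formats

-- ===== PRECONDITION & SPEC =====
def Spec_find_best_gutenberg_download (formats : List (String × String)) (out : Option String × Option String) : Prop := out = find_best_gutenberg_download_alt formats
instance (formats : List (String × String)) (out : Option String × Option String) : Decidable (Spec_find_best_gutenberg_download formats out) := by unfold Spec_find_best_gutenberg_download; infer_instance

-- ===== CLAIM (what is proved, stated in full; the proofs are below) =====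
def Claim_equal_find_best_gutenberg_download : Prop := ∀ (formats : List (String × String)), Dom_find_best_gutenberg_download formats → Spec_find_best_gutenberg_download formats (find_best_gutenberg_download formats)

-- ===== LEMMAS AND PROOFS =====
def pvPdf (p : String × String) : Bool := PySem.Str.isIn "pdf" (PySem.Str.lower p.1)
def pvEpub (p : String × String) : Bool := PySem.Str.isIn "epub" (PySem.Str.lower p.1)

theorem pvLookup_append_first (pre : List (String × String)) (p : String × String)
    (rest : List (String × String)) (h : ∀ q ∈ pre, q.1 ≠ p.1) :
    pvLookup (pre ++ p :: rest) p.1 = some p.2 := by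
  induction pre with
  | nil => simp [pvLookup]
  | cons q pre ih =>
    obtain ⟨k, v⟩ := q
    simp only [List.cons_append, pvLookup]
    rw [if_neg, ih]
    · intro q hq; exact h q (List.mem_cons_of_mem _ hq)
    · simpa using (h (k, v) (List.mem_cons_self)) 

theorem pvPdfLoop_eq (pre l : List (String × String)) (hpre : ∀ q ∈ pre, pvPdf q = false) :
    pvPdfLoop (pre ++ l) l =
      match l.find? pvPdf with
      | some p => some p.2
      | none => none := by
  induction l generalizing pre with
  | nil => simp [pvPdfLoop]
  | cons p rest ih =>
    by_cases hp : pvPdf p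
    · have hk : ∀ q ∈ pre, q.1 ≠ p.1 := by
        intro q hq he
        have := hpre q hq
        rw [pvPdf, he, ← pvPdf] at this
        simp [hp] at this
      simp [pvPdfLoop, pvPdf] at hp ⊢
      simp [hp, List.find?, pvPdf, pvLookup_append_first pre p rest hk]
    · have h2 : ∀ q ∈ pre ++ [p], pvPdf q = false := by
        intro q hq
        rcases List.mem_append.1 hq with h | h
        · exact hpre q h
        · simp at h; subst h; simpa using hp
      have := ih (pre ++ [p]) h2
      simp only [List.append_assoc, List.singleton_append] at this
      simp [pvPdf] at hp
      simp [pvPdfLoop, hp, List.find?, pvPdf, this]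

theorem pvEpubLoop_eq (pre l : List (String × String)) (hpre : ∀ q ∈ pre, pvEpub q = false) :
    pvEpubLoop (pre ++ l) l =
      match l.find? pvEpub with
      | some p => some p.2
      | none => none := by
  induction l generalizing pre with
  | nil => simp [pvEpubLoop]
  | cons p rest ih =>
    by_cases hp : pvEpub p
    · have hk : ∀ q ∈ pre, q.1 ≠ p.1 := by
        intro q hq he
        have := hpre q hq
        rw [pvEpub, he, ← pvEpub] at this
        simp [hp] at this
      simp [pvEpubLoop, pvEpub] at hp ⊢
      simp [hp, List.find?, pvEpub, pvLookup_append_first pre p rest hk]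
    · have h2 : ∀ q ∈ pre ++ [p], pvEpub q = false := by
        intro q hq
        rcases List.mem_append.1 hq with h | h
        · exact hpre q h
        · simp at h; subst h; simpa using hp
      have := ih (pre ++ [p]) h2
      simp only [List.append_assoc, List.singleton_append] at this
      simp [pvEpub] at hp
      simp [pvEpubLoop, hp, List.find?, pvEpub, this]

theorem pvAltLoop_eq (l : List (String × String)) (epub : Option String) :
    pvAltLoop epub l =
      match l.find? pvPdf with
      | some p => (some "pdf", some p.2)
      | none =>
        match epub with
        | some v => (some "epub", some v)
        | none =>
          match l.find? pvEpub with
          | some p => (some "epub", some p.2)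
          | none => (none, none) := by
  induction l generalizing epub with
  | nil => cases epub <;> simp [pvAltLoop]
  | cons p rest ih =>
    obtain ⟨k, v⟩ := p
    by_cases hp : pvPdf (k, v)
    · simp [pvPdf] at hp
      simp [pvAltLoop, hp, List.find?, pvPdf]
    · simp [pvPdf] at hp
      by_cases he : pvEpub (k, v)
      · simp [pvEpub] at he
        cases epub with
        | none => simp [pvAltLoop, hp, he, List.find?, pvPdf, pvEpub, ih]
        | some v0 => simp [pvAltLoop, hp, he, List.find?, pvPdf, ih]
      · simp [pvEpub] at he
        cases epub with
        | none => simp [pvAltLoop, hp, he, List.find?, pvPdf, pvEpub, ih]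
        | some v0 => simp [pvAltLoop, hp, he, List.find?, pvPdf, ih]

-- ===== VERDICT (by name: the statement is the Claim_ definition above) =====
theorem find_best_gutenberg_download_spec : Claim_equal_find_best_gutenberg_download := by
  intro formats _
  unfold Spec_find_best_gutenberg_download find_best_gutenberg_download find_best_gutenberg_download_alt
  have hA := pvPdfLoop_eq [] formats (by simp)
  have hE := pvEpubLoop_eq [] formats (by simp)
  have hB := pvAltLoop_eq formats none
  simp only [List.nil_append] at hA hE
  rw [hA, hB]
  cases formats.find? pvPdf with
  | some p => rfl
  | none =>
    rw [hE]
    cases formats.find? pvEpub with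
    | some p => rfl
    | none => rfl
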